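-- pv_equiv track=rewrite | github.com/bogorodka-collabZadira/SheetsZadira | app.py | deduplicate_fio_variants
-- ===== SOURCE A (Python) =====
-- def deduplicate_fio_variants(fio_list):
--     """Оставляет только самую полную форму (3 компонента), удаляя 2-компонентные, если есть полная с теми же именем/отчеством."""
--     if not fio_list:
--         return []
--     full_fios = []
--     partial_fios = []
--     for fio in fio_list:
--         parts = fio.split()
--         if len(parts) == 3:
--             full_fios.append(fio)
--         elif len(parts) == 2:
--             partial_fios.append(fio)
--     full_name_triples = []
--     for fio in full_fios:
--         parts = fio.split()
--         full_name_triples.append((parts[0], parts[1], parts[2]))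
--     kept = set(full_fios)
--     for fio in partial_fios:
--         parts = fio.split()
--         keep = True
--         for fam, name, patr in full_name_triples:
--             if len(parts) == 2 and parts[0] == name and parts[1] == patr:
--                 keep = False
--                 break
--             if len(parts) == 2 and parts[0] == fam and parts[1] == name:
--                 keep = False
--                 break
--         if keep:
--             kept.add(fio)
--     result = []
--     seen = set()
--     for fio in fio_list:
--         if fio in kept and fio not in seen:
--             result.append(fio)
--             seen.add(fio)
--     return result
-- ===== SOURCE B (Python) =====
-- def deduplicate_fio_variants(fio_list):
--     subsuming = set()
--     for fio in fio_list:
--         p = fio.split()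
--         if len(p) == 3:
--             subsuming.add((p[0], p[1]))
--             subsuming.add((p[1], p[2]))
--     result = []
--     seen = set()
--     for fio in fio_list:
--         p = fio.split()
--         if fio not in seen and (len(p) == 3 or (len(p) == 2 and (p[0], p[1]) not in subsuming)):
--             result.append(fio)
--             seen.add(fio)
--     return result
-- ===== Notes on version B (the rewrite author's own statement) =====
-- stated objective: alternative
-- what changed: Replaced A's four passes (full/partial split, triple list, per-2-part-name scan over all triples, final dedup pass) by one pass building a set of subsuming name pairs from 3-part entries plus one combined filtering/dedup pass, removing the nested scan.
import Mathlib
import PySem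

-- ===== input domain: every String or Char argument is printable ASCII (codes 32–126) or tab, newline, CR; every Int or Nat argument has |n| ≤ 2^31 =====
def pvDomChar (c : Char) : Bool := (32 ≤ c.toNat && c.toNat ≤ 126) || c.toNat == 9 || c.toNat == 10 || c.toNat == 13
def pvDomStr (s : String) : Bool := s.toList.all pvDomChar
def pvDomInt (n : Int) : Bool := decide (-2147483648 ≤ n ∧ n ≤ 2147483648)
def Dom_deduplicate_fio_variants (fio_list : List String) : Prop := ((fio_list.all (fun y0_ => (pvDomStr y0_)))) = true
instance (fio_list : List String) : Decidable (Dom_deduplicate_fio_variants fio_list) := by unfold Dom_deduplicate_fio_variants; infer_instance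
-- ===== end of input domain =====

-- B builds one set of subsuming (word,word) pairs from the 3-part names and keeps/dedups in a
-- single pass, replacing A's separate lists and its per-2-part-name scan over all 3-part triples.

-- ===== PORT A =====
-- parts[0]/parts[1]/parts[2] are only evaluated when parts has length 3 (resp. 2), so the
-- total pyGetD form is exact there.
def deduplicate_fio_variants (fio_list : List String) : List String :=
  if fio_list = [] then []
  else
    let fp := fio_list.foldl (fun (st : List String × List String) fio =>
      let parts := PySem.Str.split₀ fio
      if parts.length = 3 then (st.1 ++ [fio], st.2)
      else if parts.length = 2 then (st.1, st.2 ++ [fio])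
      else st) ([], [])
    let full_fios := fp.1
    let partial_fios := fp.2
    let full_name_triples := full_fios.foldl (fun acc fio =>
      let parts := PySem.Str.split₀ fio
      acc ++ [(PySem.List.pyGetD parts 0 "", PySem.List.pyGetD parts 1 "", PySem.List.pyGetD parts 2 "")]) []
    let kept0 : PySem.Set String := PySem.Set.ofList full_fios
    let kept := partial_fios.foldl (fun kept fio =>
      let parts := PySem.Str.split₀ fio
      -- the inner 'for … break' computes 'not any(match)'
      let keep := !(full_name_triples.any (fun t =>
        (decide (parts.length = 2) && (PySem.List.pyGetD parts 0 "" == t.2.1) && (PySem.List.pyGetD parts 1 "" == t.2.2))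
        || (decide (parts.length = 2) && (PySem.List.pyGetD parts 0 "" == t.1) && (PySem.List.pyGetD parts 1 "" == t.2.1))))
      if keep then PySem.Set.add kept fio else kept) kept0
    (fio_list.foldl (fun (st : List String × PySem.Set String) fio =>
      if PySem.Set.contains kept fio && !(PySem.Set.contains st.2 fio) then
        (st.1 ++ [fio], PySem.Set.add st.2 fio)
      else st) (([], []) : List String × PySem.Set String)).1

-- ===== PORT B =====
def deduplicate_fio_variants_alt (fio_list : List String) : List String :=
  let subsuming : PySem.Set (String × String) := fio_list.foldl (fun s fio =>
    let p := PySem.Str.split₀ fio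
    if p.length = 3 then
      PySem.Set.add (PySem.Set.add s (PySem.List.pyGetD p 0 "", PySem.List.pyGetD p 1 ""))
        (PySem.List.pyGetD p 1 "", PySem.List.pyGetD p 2 "")
    else s) PySem.Set.empty
  (fio_list.foldl (fun (st : List String × PySem.Set String) fio =>
    let p := PySem.Str.split₀ fio
    if !(PySem.Set.contains st.2 fio) &&
       (decide (p.length = 3) || (decide (p.length = 2) &&
         !(PySem.Set.contains subsuming (PySem.List.pyGetD p 0 "", PySem.List.pyGetD p 1 "")))) then
      (st.1 ++ [fio], PySem.Set.add st.2 fio)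
    else st) (([], []) : List String × PySem.Set String)).1

-- ===== PRECONDITION & SPEC =====
def Spec_deduplicate_fio_variants (fio_list : List String) (out : List String) : Prop := out = deduplicate_fio_variants_alt fio_list
instance (fio_list : List String) (out : List String) : Decidable (Spec_deduplicate_fio_variants fio_list out) := by unfold Spec_deduplicate_fio_variants; infer_instance

-- ===== CLAIM (what is proved, stated in full; the proofs are below) =====
def Claim_equal_deduplicate_fio_variants : Prop := ∀ (fio_list : List String), Dom_deduplicate_fio_variants fio_list → Spec_deduplicate_fio_variants fio_list (deduplicate_fio_variants fio_list)

-- ===== LEMMAS AND PROOFS =====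

-- the first word pair of a name
def pvPair (fio : String) : String × String :=
  (PySem.List.pyGetD (PySem.Str.split₀ fio) 0 "", PySem.List.pyGetD (PySem.Str.split₀ fio) 1 "")

def pvTr (fio : String) : String × String × String :=
  (PySem.List.pyGetD (PySem.Str.split₀ fio) 0 "", PySem.List.pyGetD (PySem.Str.split₀ fio) 1 "",
   PySem.List.pyGetD (PySem.Str.split₀ fio) 2 "")

-- A's first pass computes the two filters
theorem pvFP (l : List String) (a b : List String) :
    l.foldl (fun (st : List String × List String) fio =>
      let parts := PySem.Str.split₀ fio
      if parts.length = 3 then (st.1 ++ [fio], st.2)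
      else if parts.length = 2 then (st.1, st.2 ++ [fio])
      else st) (a, b)
    = (a ++ l.filter (fun f => decide ((PySem.Str.split₀ f).length = 3)),
       b ++ l.filter (fun f => decide ((PySem.Str.split₀ f).length = 2))) := by
  induction l generalizing a b with
  | nil => simp
  | cons x xs ih =>
    simp only [List.foldl_cons, List.filter_cons]
    by_cases h3 : (PySem.Str.split₀ x).length = 3
    · simp [h3, ih]
    · by_cases h2 : (PySem.Str.split₀ x).length = 2
      · simp [h3, h2, ih]
      · simp [h3, h2, ih]

-- triple collection is a map
theorem pvTRP (l : List String) (acc : List (String × String × String)) :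
    l.foldl (fun acc fio =>
      let parts := PySem.Str.split₀ fio
      acc ++ [(PySem.List.pyGetD parts 0 "", PySem.List.pyGetD parts 1 "", PySem.List.pyGetD parts 2 "")]) acc
    = acc ++ l.map pvTr := by
  induction l generalizing acc with
  | nil => simp
  | cons x xs ih => simp [ih, pvTr]

-- membership in the kept set after the partial-name loop
theorem pvKeptMem (keepF : String → Bool) (l : List String) (k0 : PySem.Set String) (x : String) :
    x ∈ l.foldl (fun kept fio => if keepF fio then PySem.Set.add kept fio else kept) k0
    ↔ x ∈ k0 ∨ (x ∈ l ∧ keepF x = true) := by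
  induction l generalizing k0 with
  | nil => simp
  | cons y ys ih =>
    by_cases hy : keepF y = true <;>
      simp [hy, ih, PySem.Set.mem_add] <;> aesop

-- membership in B's subsuming set
theorem pvSubMem (l : List String) (s0 : PySem.Set (String × String)) (x : String × String) :
    x ∈ l.foldl (fun s fio =>
      let p := PySem.Str.split₀ fio
      if p.length = 3 then
        PySem.Set.add (PySem.Set.add s (PySem.List.pyGetD p 0 "", PySem.List.pyGetD p 1 ""))
          (PySem.List.pyGetD p 1 "", PySem.List.pyGetD p 2 "")
      else s) s0
    ↔ x ∈ s0 ∨ ∃ g ∈ l, (PySem.Str.split₀ g).length = 3 ∧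
        (x = pvPair g ∨ x = (PySem.List.pyGetD (PySem.Str.split₀ g) 1 "", PySem.List.pyGetD (PySem.Str.split₀ g) 2 "")) := by
  induction l generalizing s0 with
  | nil => simp
  | cons y ys ih =>
    by_cases h3 : (PySem.Str.split₀ y).length = 3 <;>
      simp [h3, ih, PySem.Set.mem_add, pvPair] <;> aesop

-- the two loops' keep conditions agree on every element of the list
theorem pvGuard (l : List String) (x : String) (hx : x ∈ l) :
    PySem.Set.contains
      ((l.filter (fun f => decide ((PySem.Str.split₀ f).length = 2))).foldl
        (fun kept fio =>
          let parts := PySem.Str.split₀ fio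
          let keep := !(((l.filter (fun f => decide ((PySem.Str.split₀ f).length = 3))).map pvTr).any (fun t =>
            (decide (parts.length = 2) && (PySem.List.pyGetD parts 0 "" == t.2.1) && (PySem.List.pyGetD parts 1 "" == t.2.2))
            || (decide (parts.length = 2) && (PySem.List.pyGetD parts 0 "" == t.1) && (PySem.List.pyGetD parts 1 "" == t.2.1))))
          if keep then PySem.Set.add kept fio else kept)
        (PySem.Set.ofList (l.filter (fun f => decide ((PySem.Str.split₀ f).length = 3)))))
      x
    = (decide ((PySem.Str.split₀ x).length = 3) || (decide ((PySem.Str.split₀ x).length = 2) &&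
        !(PySem.Set.contains (l.foldl (fun s fio =>
            let p := PySem.Str.split₀ fio
            if p.length = 3 then
              PySem.Set.add (PySem.Set.add s (PySem.List.pyGetD p 0 "", PySem.List.pyGetD p 1 ""))
                (PySem.List.pyGetD p 1 "", PySem.List.pyGetD p 2 "")
            else s) PySem.Set.empty)
          (PySem.List.pyGetD (PySem.Str.split₀ x) 0 "", PySem.List.pyGetD (PySem.Str.split₀ x) 1 "")))) := by
  rw [Bool.eq_iff_iff]
  simp only [Bool.or_eq_true, Bool.and_eq_true, Bool.not_eq_true', Bool.eq_false_iff, ne_eq,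
    PySem.Set.contains_iff, pvKeptMem, PySem.Set.mem_ofList, pvSubMem, List.mem_filter,
    decide_eq_true_eq, List.any_map, List.any_eq_true, List.mem_map, Function.comp, pvTr, pvPair,
    Prod.mk.injEq, beq_iff_eq, List.not_mem_nil, false_or]
  by_cases h3 : (PySem.Str.split₀ x).length = 3 <;>
    by_cases h2 : (PySem.Str.split₀ x).length = 2 <;>
      simp only [h3, h2, hx, true_and, and_true, false_and, and_false, false_or, or_false,
        not_false_eq_true, iff_true, true_iff, false_iff, not_exists, not_and, not_or] <;>
      first
        | omega
        | tauto
        | aesop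

-- ===== VERDICT (by name: the statement is the Claim_ definition above) =====
theorem deduplicate_fio_variants_spec : Claim_equal_deduplicate_fio_variants := by
  intro fio_list _
  show deduplicate_fio_variants fio_list = deduplicate_fio_variants_alt fio_list
  by_cases hnil : fio_list = []
  · subst hnil; rfl
  · unfold deduplicate_fio_variants deduplicate_fio_variants_alt
    rw [if_neg hnil]
    simp only [pvFP, List.nil_append, pvTRP]
    apply congrArg Prod.fst
    apply PySem.List.foldl_congr_mem
    intro acc x hx
    simp only [pvGuard fio_list x hx, Bool.and_comm]
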